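-- pv_equiv track=rewrite | github.com/2024-pass-backend/algorithm | Week5/공통/택배상자/suhyun.py | solution
-- ===== SOURCE A (Python) =====
-- from collections import deque
--
-- def solution(order):
--     order = deque(order)
--     stack = []
--     result = [] #트럭에 실은 상자
--     for i in range(1, len(order) + 1):
--         stack.append(i)
--         while stack:
--             if stack and stack[-1] == order[0]:
--                 num = order.popleft()
--                 stack.pop()
--                 result.append(num)
--             else:
--                 break
--     return len(result)
-- ===== SOURCE B (Python) =====
-- def solution(order):
--     n = len(order)
--     stack = []
--     need = 1      # next unused supply box
--     count = 0
--     for b in order: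
--         while (not stack or stack[-1] != b) and need <= n and need <= b:
--             stack.append(need)
--             need += 1
--         if stack and stack[-1] == b:
--             stack.pop()
--             count += 1
--         else:
--             break
--     return count
-- ===== Notes on version B (the rewrite author's own statement) =====
-- stated objective: alternative
-- what changed: B iterates over the target sequence `order` with a `need` counter for the next unused supply box (push until the top matches or the supply/box bound runs out, then pop or stop early), instead of A's loop over the full supply 1..n with an inner pop-while-match against a deque of targets.
import Mathlib
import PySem

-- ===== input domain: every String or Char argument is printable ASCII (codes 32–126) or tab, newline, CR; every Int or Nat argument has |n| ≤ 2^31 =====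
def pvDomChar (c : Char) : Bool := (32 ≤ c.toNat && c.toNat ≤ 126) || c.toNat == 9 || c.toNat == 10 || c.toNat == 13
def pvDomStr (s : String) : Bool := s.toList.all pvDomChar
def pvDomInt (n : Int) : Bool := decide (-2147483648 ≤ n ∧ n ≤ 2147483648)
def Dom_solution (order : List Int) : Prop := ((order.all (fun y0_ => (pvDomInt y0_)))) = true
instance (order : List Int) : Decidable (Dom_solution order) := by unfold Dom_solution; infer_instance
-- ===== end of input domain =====

-- B drives the loop over the target sequence with a 'need' counter instead of over the supply 1..n (different decomposition, same cost).

-- ===== PORT A =====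
-- The stack is a cons-list whose head is Python's stack[-1]; push = cons.
-- Inner 'while stack: if stack and stack[-1]==order[0]: pop both else break':
-- with ord = [] Python's order[0] would raise IndexError, but that state is
-- unreachable (pops never exceed pushes); the port breaks there.
def solWhile : List Int → List Int → List Int → (List Int × List Int × List Int)
  | t :: st, o :: os, res => if t = o then solWhile st os (res ++ [o]) else (t :: st, o :: os, res)
  | st, ord, res => (st, ord, res)

-- 'for i in range(1, len(order)+1): stack.append(i); <while>'
def solLoop : List Int → List Int × List Int × List Int → List Int × List Int × List Int
  | [], s => s
  | i :: is, (stack, ord, res) => solLoop is (solWhile (i :: stack) ord res)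

def solution (order : List Int) : Int :=
  ((solLoop (PySem.List.pyRange 1 ((order.length : Int) + 1) 1) ([], order, [])).2.2.length : Int)

-- ===== PORT B =====
-- 'while (not stack or stack[-1] != b) and need <= n and need <= b: stack.append(need); need += 1'
def altWhile (stack : List Int) (need b n : Int) : List Int × Int :=
  if stack.head? ≠ some b ∧ need ≤ n ∧ need ≤ b then
    altWhile (need :: stack) (need + 1) b n
  else (stack, need)
  termination_by (b + 1 - need).toNat
  decreasing_by omega

-- 'for b in order: <while>; if stack and stack[-1]==b: pop; count+=1 else: break'
def altLoop : List Int → List Int → Int → Int → Int → Int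
  | [], _, _, _, count => count
  | b :: os, stack, need, n, count =>
    match altWhile stack need b n with
    | (t :: st, need') => if t = b then altLoop os st need' n (count + 1) else count
    | ([], _) => count

def solution_alt (order : List Int) : Int :=
  altLoop order [] 1 (order.length : Int) 0

-- ===== PRECONDITION & SPEC =====
def Spec_solution (order : List Int) (out : Int) : Prop := out = solution_alt order
instance (order : List Int) (out : Int) : Decidable (Spec_solution order out) := by unfold Spec_solution; infer_instance

-- ===== CLAIM (what is proved, stated in full; the proofs are below) =====
def Claim_equal_solution : Prop := ∀ (order : List Int), Dom_solution order → Spec_solution order (solution order)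


-- ===== LEMMAS AND PROOFS =====

-- Reference step function: pop on a match at the top, else push the next supply if any.
def gRef (n : Int) : List Int → List Int → Int → Nat
  | [], _, _ => 0
  | o :: os, t :: st, need =>
    if t = o then 1 + gRef n os st need
    else if need ≤ n then gRef n (o :: os) (need :: t :: st) (need + 1) else 0
  | o :: os, [], need =>
    if need ≤ n then gRef n (o :: os) [need] (need + 1) else 0
  termination_by ord stack need => 2 * ord.length + stack.length + 2 * (n + 1 - need).toNat
  decreasing_by all_goals (simp only [List.length_cons]; omega)

-- one-step unfolding lemmas (rw-friendly; simp-unfolding gRef/solWhile/altWhile loops)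
theorem gRef_nil (n : Int) (st : List Int) (need : Int) : gRef n [] st need = 0 := by
  conv_lhs => rw [gRef]

theorem gRef_pop (n t o : Int) (os st : List Int) (need : Int) (h : t = o) :
    gRef n (o :: os) (t :: st) need = 1 + gRef n os st need := by
  conv_lhs => rw [gRef]
  rw [if_pos h]

theorem gRef_push_cons (n t o : Int) (os st : List Int) (need : Int) (h : ¬ t = o)
    (hn : need ≤ n) :
    gRef n (o :: os) (t :: st) need = gRef n (o :: os) (need :: t :: st) (need + 1) := by
  conv_lhs => rw [gRef]
  rw [if_neg h, if_pos hn]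

theorem gRef_dead_cons (n t o : Int) (os st : List Int) (need : Int) (h : ¬ t = o)
    (hn : ¬ need ≤ n) : gRef n (o :: os) (t :: st) need = 0 := by
  conv_lhs => rw [gRef]
  rw [if_neg h, if_neg hn]

theorem gRef_push_nil (n o : Int) (os : List Int) (need : Int) (hn : need ≤ n) :
    gRef n (o :: os) [] need = gRef n (o :: os) [need] (need + 1) := by
  conv_lhs => rw [gRef]
  rw [if_pos hn]

theorem gRef_dead_nil (n o : Int) (os : List Int) (need : Int) (hn : ¬ need ≤ n) :
    gRef n (o :: os) [] need = 0 := by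
  conv_lhs => rw [gRef]
  rw [if_neg hn]

theorem solWhile_cons_eq (t o : Int) (st os res : List Int) (h : t = o) :
    solWhile (t :: st) (o :: os) res = solWhile st os (res ++ [o]) := by
  conv_lhs => rw [solWhile]
  rw [if_pos h]

theorem solWhile_cons_ne (t o : Int) (st os res : List Int) (h : ¬ t = o) :
    solWhile (t :: st) (o :: os) res = (t :: st, o :: os, res) := by
  conv_lhs => rw [solWhile]
  rw [if_neg h]

theorem solWhile_nil_ord (st res : List Int) : solWhile st [] res = (st, [], res) := by
  cases st <;> rfl

theorem solWhile_nil_stack (ord res : List Int) : solWhile [] ord res = ([], ord, res) := by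
  cases ord <;> rfl

-- A state is stable when A's inner while would do nothing on it.
def Stable : List Int → List Int → Prop
  | t :: _, o :: _ => t ≠ o
  | _, _ => True

theorem stable_nil_stack (ord : List Int) : Stable [] ord := by
  cases ord <;> trivial

theorem stable_solWhile (stack ord res : List Int) :
    Stable (solWhile stack ord res).1 (solWhile stack ord res).2.1 := by
  fun_induction solWhile stack ord res with
  | case1 st o os res ih => exact ih
  | case2 t st o os res h => exact h
  | case3 st ord res h =>
    cases st with
    | nil => exact stable_nil_stack ord
    | cons a as =>
      cases ord with
      | nil => trivial
      | cons b bs => exact (h a as b bs rfl rfl).elim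

-- the accumulator factors out of solWhile
theorem solWhile_res (stack : List Int) : ∀ (ord res : List Int),
    solWhile stack ord res
      = ((solWhile stack ord []).1, (solWhile stack ord []).2.1, res ++ (solWhile stack ord []).2.2) := by
  induction stack with
  | nil => intro ord res; rw [solWhile_nil_stack, solWhile_nil_stack]; simp
  | cons t st ih =>
    intro ord res
    cases ord with
    | nil => rw [solWhile_nil_ord, solWhile_nil_ord]; simp
    | cons o os =>
      by_cases h : t = o
      · rw [solWhile_cons_eq t o st os res h, solWhile_cons_eq t o st os [] h]
        rw [ih os (res ++ [o]), ih os ([] ++ [o])]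
        simp
      · rw [solWhile_cons_ne t o st os res h, solWhile_cons_ne t o st os [] h]; simp

-- gRef absorbs A's inner while
theorem gRef_solWhile (n : Int) (stack : List Int) : ∀ (ord : List Int) (need : Int),
    gRef n ord stack need
      = (solWhile stack ord []).2.2.length
        + gRef n (solWhile stack ord []).2.1 (solWhile stack ord []).1 need := by
  induction stack with
  | nil => intro ord need; rw [solWhile_nil_stack]; simp
  | cons t st ih =>
    intro ord need
    cases ord with
    | nil => rw [solWhile_nil_ord]; simp [gRef_nil]
    | cons o os =>
      by_cases h : t = o
      · rw [solWhile_cons_eq t o st os [] h, solWhile_res st os ([] ++ [o])]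
        rw [gRef_pop n t o os st need h, ih os need]
        simp; omega
      · rw [solWhile_cons_ne t o st os [] h]; simp

-- gRef is unchanged by a push in a stable state
theorem gRef_push (n : Int) (stack ord : List Int) (need : Int)
    (hs : Stable stack ord) (hn : need ≤ n) :
    gRef n ord stack need = gRef n ord (need :: stack) (need + 1) := by
  cases ord with
  | nil => rw [gRef_nil, gRef_nil]
  | cons o os =>
    cases stack with
    | nil => exact gRef_push_nil n o os need hn
    | cons t st => exact gRef_push_cons n t o os st need hs hn

-- gRef is 0 when stuck with no supplies left
theorem gRef_stuck (n : Int) (stack ord : List Int) (need : Int)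
    (hs : Stable stack ord) (hn : ¬ need ≤ n) :
    gRef n ord stack need = 0 := by
  cases ord with
  | nil => rw [gRef_nil]
  | cons o os =>
    cases stack with
    | nil => exact gRef_dead_nil n o os need hn
    | cons t st => exact gRef_dead_cons n t o os st need hs hn

-- gRef is 0 when the needed box was already used (o < need) and is not on top
theorem gRef_zero (n : Int) : ∀ (k : ℕ) (need : Int), (n + 1 - need).toNat = k →
    ∀ (stack : List Int) (o : Int) (os : List Int),
      o < need → stack.head? ≠ some o → gRef n (o :: os) stack need = 0 := by
  intro k
  induction k with
  | zero =>
    intro need hk stack o os ho hh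
    have hn : ¬ need ≤ n := by omega
    cases stack with
    | nil => exact gRef_dead_nil n o os need hn
    | cons t st => exact gRef_dead_cons n t o os st need (by simpa using hh) hn
  | succ k ih =>
    intro need hk stack o os ho hh
    by_cases hn : need ≤ n
    · have step : gRef n (o :: os) stack need = 0 → True := fun _ => trivial
      cases stack with
      | nil =>
        rw [gRef_push_nil n o os need hn]
        exact ih (need + 1) (by omega) [need] o os (by omega) (by simp; omega)
      | cons t st =>
        rw [gRef_push_cons n t o os st need (by simpa using hh) hn]
        exact ih (need + 1) (by omega) (need :: t :: st) o os (by omega) (by simp; omega)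
    · cases stack with
      | nil => exact gRef_dead_nil n o os need hn
      | cons t st => exact gRef_dead_cons n t o os st need (by simpa using hh) hn

-- A's remaining run from a stable state computes gRef
theorem lemA (n : Int) : ∀ (k : ℕ) (need : Int), (n + 1 - need).toNat = k →
    ∀ (stack ord res : List Int), Stable stack ord →
      (solLoop (PySem.List.pyRange need (n + 1) 1) (stack, ord, res)).2.2.length
        = res.length + gRef n ord stack need := by
  intro k
  induction k with
  | zero =>
    intro need hk stack ord res hs
    rw [PySem.List.pyRange_one_eq_nil (by omega)]
    rw [gRef_stuck n stack ord need hs (by omega)]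
    simp [solLoop]
  | succ k ih =>
    intro need hk stack ord res hs
    have hn : need ≤ n := by omega
    rw [PySem.List.pyRange_one_cons (by omega)]
    simp only [solLoop]
    rw [solWhile_res (need :: stack) ord res]
    rw [ih (need + 1) (by omega) _ _ _ (stable_solWhile (need :: stack) ord [])]
    rw [gRef_push n stack ord need hs hn, gRef_solWhile n (need :: stack) ord (need + 1)]
    simp; omega

-- one-step unfolding for B's inner while
theorem altWhile_step (stack : List Int) (need b n : Int)
    (h : stack.head? ≠ some b ∧ need ≤ n ∧ need ≤ b) :
    altWhile stack need b n = altWhile (need :: stack) (need + 1) b n := by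
  conv_lhs => rw [altWhile]
  rw [if_pos h]

theorem altWhile_done (stack : List Int) (need b n : Int)
    (h : ¬ (stack.head? ≠ some b ∧ need ≤ n ∧ need ≤ b)) :
    altWhile stack need b n = (stack, need) := by
  conv_lhs => rw [altWhile]
  rw [if_neg h]

-- B computes gRef
theorem lemB (n : Int) (ord : List Int) : ∀ (stack : List Int) (need : Int),
    ∀ count : Int, altLoop ord stack need n count = count + (gRef n ord stack need : Int) := by
  intro stack need
  fun_induction gRef n ord stack need with
  | case1 st need =>
    intro count; simp [altLoop]
  | case2 os t st need ih =>
    intro count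
    rw [show altLoop (t :: os) (t :: st) need n count
          = altLoop os st need n (count + 1) by
        simp only [altLoop, altWhile_done (t :: st) need t n (by simp)]
        simp]
    rw [ih]
    push_cast; ring
  | case3 o os t st need h hn ih =>
    intro count
    by_cases hb : need ≤ o
    · rw [show altLoop (o :: os) (t :: st) need n count
            = altLoop (o :: os) (need :: t :: st) (need + 1) n count by
          simp only [altLoop, altWhile_step (t :: st) need o n (by simp [h, hn, hb])]]
      exact ih count
    · rw [show altLoop (o :: os) (t :: st) need n count = count by
          simp only [altLoop, altWhile_done (t :: st) need o n (by simp; intro _ _; omega)]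
          simp [h]]
      rw [gRef_zero n (n + 1 - (need + 1)).toNat (need + 1) rfl (need :: t :: st) o os
            (by omega) (by simp; omega)]
      simp
  | case4 o os t st need h hn =>
    intro count
    rw [show altLoop (o :: os) (t :: st) need n count = count by
        simp only [altLoop, altWhile_done (t :: st) need o n (by simp; intro _ h2; omega)]
        simp [h]]
    simp
  | case5 o os need hn ih =>
    intro count
    by_cases hb : need ≤ o
    · rw [show altLoop (o :: os) [] need n count
            = altLoop (o :: os) [need] (need + 1) n count by
          simp only [altLoop, altWhile_step [] need o n (by simp [hn, hb])]]
      exact ih count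
    · rw [show altLoop (o :: os) [] need n count = count by
          simp only [altLoop, altWhile_done [] need o n (by simp; intro _; omega)]]
      rw [gRef_zero n (n + 1 - (need + 1)).toNat (need + 1) rfl [need] o os
            (by omega) (by simp; omega)]
      simp
  | case6 o os need hn =>
    intro count
    rw [show altLoop (o :: os) [] need n count = count by
        simp only [altLoop, altWhile_done [] need o n (by simp; intro _; omega)]]
    simp

-- ===== VERDICT (by name: the statement is the Claim_ definition above) =====
theorem solution_spec : Claim_equal_solution := by
  intro order _
  unfold Spec_solution solution solution_alt
  rw [lemA (order.length : Int) ((order.length : Int) + 1 - 1).toNat 1 rfl [] order []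
        (stable_nil_stack order)]
  rw [lemB (order.length : Int) order [] 1 0]
  simp
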